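-- pv_equiv track=rewrite | github.com/nuagenetworks/nuage-metroae | roles/vstat-vsc-health/files/vstat_vsc_verify.py | get_vsclines
-- ===== SOURCE A (Python) =====
-- def get_vsclines(fp):
--     vsc_lines = []
--     vsc_start = False
--     for line in fp:
--         # Removes any whitespace before and after the line
--         line = line.strip()
--         if (line.startswith("[vscs]")):
--             vsc_start = True
--
--         # Start appending lines only for [vscs] group
--         if (vsc_start and line):
--             if (line.startswith("[")):
--                 # Reset flag to False if group name is other than vscs
--                 if (not line.startswith("[vscs]")):
--                     vsc_start = False
--             else:
--                 vsc_lines.append(line)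
--
--     yield vsc_lines
-- ===== SOURCE B (Python) =====
-- def get_vsclines(fp):
--     # Two-phase: collect (header, body) sections, then concatenate bodies of [vscs] sections.
--     sections = []
--     current = None  # (header, body lines)
--     for raw in fp:
--         line = raw.strip()
--         if not line:
--             continue
--         if line.startswith("["):
--             if current is not None:
--                 sections.append(current)
--             current = (line, [])
--         elif current is not None:
--             current = (current[0], current[1] + [line])
--     if current is not None:
--         sections.append(current)
--     result = []
--     for hdr, body in sections:
--         if hdr.startswith("[vscs]"):
--             result.extend(body)
--     yield result
-- ===== Notes on version B (the rewrite author's own statement) =====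
-- stated objective: alternative
-- what changed: Replaced the flag-driven single loop with a two-phase decomposition: first group the stripped non-empty lines into (header, body) sections in order of appearance, then concatenate the bodies of the sections whose header starts with '[vscs]'.
import Mathlib
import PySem

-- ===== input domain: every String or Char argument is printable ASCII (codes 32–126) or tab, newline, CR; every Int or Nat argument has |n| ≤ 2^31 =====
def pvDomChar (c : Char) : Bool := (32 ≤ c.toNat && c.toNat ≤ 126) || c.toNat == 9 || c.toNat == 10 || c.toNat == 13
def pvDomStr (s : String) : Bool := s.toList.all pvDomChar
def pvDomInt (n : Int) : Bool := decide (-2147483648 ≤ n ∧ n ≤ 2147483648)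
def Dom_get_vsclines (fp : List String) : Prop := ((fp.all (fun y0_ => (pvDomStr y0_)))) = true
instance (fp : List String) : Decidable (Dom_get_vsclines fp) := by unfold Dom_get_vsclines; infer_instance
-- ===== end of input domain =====

-- B replaces A's flag-driven single loop by a two-phase decomposition (group lines into
-- (header, body) sections, then collect the bodies of the [vscs] sections); same cost.

-- ===== PORT A =====
-- one iteration of A's for-loop over the state (vsc_lines, vsc_start)
def pvStepA (s : List String × Bool) (line0 : String) : List String × Bool :=
  let line := PySem.Str.strip line0
  let vsc_start := if PySem.Str.startswith line "[vscs]" then true else s.2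
  if vsc_start = true ∧ line ≠ "" then
    if PySem.Str.startswith line "[" then
      if ¬ (PySem.Str.startswith line "[vscs]" = true) then (s.1, false) else (s.1, vsc_start)
    else (s.1 ++ [line], vsc_start)
  else (s.1, vsc_start)

def get_vsclines (fp : List String) : List (List String) :=
  let st := fp.foldl pvStepA ([], false)
  [st.1]

-- ===== PORT B =====
-- one iteration of B's first loop over the state (sections, current)
def pvStepB (st : List (String × List String) × Option (String × List String)) (raw : String) :
    List (String × List String) × Option (String × List String) :=
  let line := PySem.Str.strip raw
  if line = "" then st
  else if PySem.Str.startswith line "[" then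
    ((match st.2 with | some cur => st.1 ++ [cur] | none => st.1), some (line, []))
  else match st.2 with
    | some cur => (st.1, some (cur.1, cur.2 ++ [line]))
    | none => st

-- B's second loop: concatenate the bodies of the sections whose header startswith "[vscs]"
def pvCollect (secs : List (String × List String)) : List String :=
  secs.foldl (fun acc sec => if PySem.Str.startswith sec.1 "[vscs]" then acc ++ sec.2 else acc) []

def get_vsclines_alt (fp : List String) : List (List String) :=
  let st := fp.foldl pvStepB ([], none)
  let sections := st.1 ++ (match st.2 with | some cur => [cur] | none => [])
  [pvCollect sections]

-- ===== PRECONDITION & SPEC =====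
def Spec_get_vsclines (fp : List String) (out : List (List String)) : Prop := out = get_vsclines_alt fp
instance (fp : List String) (out : List (List String)) : Decidable (Spec_get_vsclines fp out) := by unfold Spec_get_vsclines; infer_instance

-- ===== CLAIM (what is proved, stated in full; the proofs are below) =====
def Claim_equal_get_vsclines : Prop := ∀ (fp : List String), Dom_get_vsclines fp → Spec_get_vsclines fp (get_vsclines fp)

-- ===== LEMMAS AND PROOFS =====

-- body contributed by B's current (still unflushed) section
def pvCurBody (cur : Option (String × List String)) : List String :=
  match cur with
  | some (h, b) => if PySem.Str.startswith h "[vscs]" then b else []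
  | none => []

-- A's flag, read off B's current section
def pvCurFlag (cur : Option (String × List String)) : Bool :=
  match cur with
  | some (h, _) => PySem.Str.startswith h "[vscs]"
  | none => false

-- invariant tying A's loop state to B's loop state
def pvRel (a : List String × Bool) (b : List (String × List String) × Option (String × List String)) : Prop :=
  a.2 = pvCurFlag b.2 ∧ a.1 = pvCollect b.1 ++ pvCurBody b.2

lemma pvCollect_foldl (xs : List (String × List String)) (acc : List String) :
    xs.foldl (fun acc sec => if PySem.Str.startswith sec.1 "[vscs]" then acc ++ sec.2 else acc) acc
      = acc ++ pvCollect xs := by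
  induction xs generalizing acc with
  | nil => simp [pvCollect]
  | cons x xs ih =>
      rw [List.foldl_cons, ih]
      have h2 : pvCollect (x :: xs)
          = (if PySem.Str.startswith x.1 "[vscs]" then x.2 else []) ++ pvCollect xs := by
        rw [pvCollect, List.foldl_cons, ih]
        split <;> simp
      rw [h2]
      split <;> simp

lemma pvCollect_append (xs ys : List (String × List String)) :
    pvCollect (xs ++ ys) = pvCollect xs ++ pvCollect ys := by
  rw [pvCollect, List.foldl_append, pvCollect_foldl, pvCollect_foldl, List.nil_append]

lemma pvCollect_singleton (h : String) (b : List String) :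
    pvCollect [(h, b)] = if PySem.Str.startswith h "[vscs]" then b else [] := by
  rw [pvCollect, List.foldl_cons, List.foldl_nil]; split <;> simp

-- a line starting with "[vscs]" also starts with "[" (prefix transitivity)
lemma pv_vscs_bracketC (cs : List Char)
    (h : PySem.Chars.startswith cs ['[', 'v', 's', 'c', 's', ']'] = true) :
    PySem.Chars.startswith cs ['['] = true := by
  rw [PySem.Chars.startswith_iff] at *
  exact List.IsPrefix.trans (by decide) h

lemma pv_vscs_nilC : PySem.Chars.startswith [] ['[', 'v', 's', 'c', 's', ']'] = false := by decide

lemma pv_step (line0 : String) (a : List String × Bool)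
    (b : List (String × List String) × Option (String × List String))
    (hrel : pvRel a b) : pvRel (pvStepA a line0) (pvStepB b line0) := by
  obtain ⟨lines, flag⟩ := a
  obtain ⟨secs, cur⟩ := b
  obtain ⟨hflag, hlines⟩ := hrel
  simp only at hflag hlines
  unfold pvStepA pvStepB pvRel
  dsimp only
  cases cur with
  | none =>
      simp only [pvCurFlag] at hflag
      simp only [pvCurBody, List.append_nil] at hlines
      split_ifs with h1 h2 h3 h4 h5 h6 h7 h8 h9 h10 h11 h12 <;>
        simp_all [pvCurFlag, pvCurBody, pv_vscs_bracketC, pv_vscs_nilC]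
  | some cur =>
      obtain ⟨h, bdy⟩ := cur
      simp only [pvCurFlag] at hflag
      simp only [pvCurBody] at hlines
      split_ifs with h1 h2 h3 h4 h5 h6 h7 h8 h9 h10 h11 h12 <;>
        simp_all [pvCurFlag, pvCurBody, pvCollect_append, pvCollect_singleton,
          pv_vscs_bracketC, pv_vscs_nilC]

lemma pv_fold (fp : List String) (a : List String × Bool)
    (b : List (String × List String) × Option (String × List String))
    (hrel : pvRel a b) : pvRel (fp.foldl pvStepA a) (fp.foldl pvStepB b) := by
  induction fp generalizing a b with
  | nil => exact hrel
  | cons x xs ih => exact ih _ _ (pv_step x a b hrel)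

-- ===== VERDICT (by name: the statement is the Claim_ definition above) =====
theorem get_vsclines_spec : Claim_equal_get_vsclines := by
  intro fp _
  unfold Spec_get_vsclines get_vsclines get_vsclines_alt
  obtain ⟨_, hlines⟩ := pv_fold fp ([], false) ([], none) ⟨rfl, rfl⟩
  dsimp only
  rw [List.cons.injEq, and_iff_left rfl, hlines]
  cases hc : (fp.foldl pvStepB ([], none)).2 with
  | none => simp [pvCurBody]
  | some cur =>
      obtain ⟨h, bdy⟩ := cur
      rw [pvCollect_append, pvCollect_singleton]
      simp [pvCurBody]
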